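-- pv_equiv track=rewrite | github.com/MakisEu/SnakeAI | old version/agent.py | _calcObsticles
-- ===== SOURCE A (Python) =====
-- def _calcObsticles(obsticles,snake):
--     obsticles_at_each_direction=[0,0,0,0]
--
--     for obsticle in obsticles:
--         lr=obsticle[0]-snake[0]
--         ud=obsticle[1]-snake[1]
--         if (lr>0):
--             obsticles_at_each_direction[1]+=1
--         elif (lr<0):
--             obsticles_at_each_direction[0]+=1
--         if (ud>0):
--             obsticles_at_each_direction[3]+=1
--         elif (ud<0):
--             obsticles_at_each_direction[2]+=1
--     return obsticles_at_each_direction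
-- ===== SOURCE B (Python) =====
-- def _calcObsticles(obsticles, snake):
--     left = sum(1 for o in obsticles if o[0] - snake[0] < 0)
--     right = sum(1 for o in obsticles if o[0] - snake[0] > 0)
--     up = sum(1 for o in obsticles if o[1] - snake[1] < 0)
--     down = sum(1 for o in obsticles if o[1] - snake[1] > 0)
--     return [left, right, up, down]
-- ===== Notes on version B (the rewrite author's own statement) =====
-- stated objective: simpler
-- what changed: Replaces A's single fused loop mutating a 4-element counter list with four independent one-condition counting passes (generator-expression sums), one per direction.
import Mathlib
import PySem

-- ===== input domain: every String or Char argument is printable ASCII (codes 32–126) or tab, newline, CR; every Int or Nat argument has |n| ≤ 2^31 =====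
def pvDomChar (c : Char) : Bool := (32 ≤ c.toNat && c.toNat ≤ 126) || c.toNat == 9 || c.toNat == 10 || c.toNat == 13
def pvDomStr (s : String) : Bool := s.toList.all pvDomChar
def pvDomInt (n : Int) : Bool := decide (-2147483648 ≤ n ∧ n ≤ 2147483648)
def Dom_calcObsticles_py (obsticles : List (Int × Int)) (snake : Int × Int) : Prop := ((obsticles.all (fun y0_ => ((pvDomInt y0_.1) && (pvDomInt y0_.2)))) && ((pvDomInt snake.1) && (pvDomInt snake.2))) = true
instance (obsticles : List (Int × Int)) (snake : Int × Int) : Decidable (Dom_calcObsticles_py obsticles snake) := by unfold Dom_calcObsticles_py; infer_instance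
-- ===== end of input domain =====

-- B: four independent counting passes instead of A's fused loop over a mutable 4-counter (objective: simpler).
-- ===== PORT A =====
-- A's loop updates a 4-element counter list; ported as a foldl over the four counters (left, right, up, down).
def calcObsticles_py (obsticles : List (Int × Int)) (snake : Int × Int) : List Int :=
  let r :=
    obsticles.foldl (fun (acc : Int × Int × Int × Int) obsticle =>
      let lr := obsticle.1 - snake.1
      let ud := obsticle.2 - snake.2
      let acc :=
        if lr > 0 then (acc.1, acc.2.1 + 1, acc.2.2.1, acc.2.2.2)
        else if lr < 0 then (acc.1 + 1, acc.2.1, acc.2.2.1, acc.2.2.2)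
        else acc
      if ud > 0 then (acc.1, acc.2.1, acc.2.2.1, acc.2.2.2 + 1)
      else if ud < 0 then (acc.1, acc.2.1, acc.2.2.1 + 1, acc.2.2.2)
      else acc) (0, 0, 0, 0)
  [r.1, r.2.1, r.2.2.1, r.2.2.2]

-- ===== PORT B =====
def calcObsticles_py_alt (obsticles : List (Int × Int)) (snake : Int × Int) : List Int :=
  let left : Int := (obsticles.countP (fun o => o.1 - snake.1 < 0) : Nat)
  let right : Int := (obsticles.countP (fun o => o.1 - snake.1 > 0) : Nat)
  let up : Int := (obsticles.countP (fun o => o.2 - snake.2 < 0) : Nat)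
  let down : Int := (obsticles.countP (fun o => o.2 - snake.2 > 0) : Nat)
  [left, right, up, down]

-- ===== PRECONDITION & SPEC =====
def Spec_calcObsticles_py (obsticles : List (Int × Int)) (snake : Int × Int) (out : List Int) : Prop := out = calcObsticles_py_alt obsticles snake
instance (obsticles : List (Int × Int)) (snake : Int × Int) (out : List Int) : Decidable (Spec_calcObsticles_py obsticles snake out) := by unfold Spec_calcObsticles_py; infer_instance

-- ===== CLAIM (what is proved, stated in full; the proofs are below) =====
def Claim_equal_calcObsticles_py : Prop := ∀ (obsticles : List (Int × Int)) (snake : Int × Int), Dom_calcObsticles_py obsticles snake → Spec_calcObsticles_py obsticles snake (calcObsticles_py obsticles snake)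

-- ===== LEMMAS AND PROOFS =====

theorem calcObsticles_fold_inv (snake : Int × Int) (obsticles : List (Int × Int))
    (a b c d : Int) :
    obsticles.foldl (fun (acc : Int × Int × Int × Int) obsticle =>
      let lr := obsticle.1 - snake.1
      let ud := obsticle.2 - snake.2
      let acc :=
        if lr > 0 then (acc.1, acc.2.1 + 1, acc.2.2.1, acc.2.2.2)
        else if lr < 0 then (acc.1 + 1, acc.2.1, acc.2.2.1, acc.2.2.2)
        else acc
      if ud > 0 then (acc.1, acc.2.1, acc.2.2.1, acc.2.2.2 + 1)
      else if ud < 0 then (acc.1, acc.2.1, acc.2.2.1 + 1, acc.2.2.2)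
      else acc) (a, b, c, d) =
      (a + (obsticles.countP (fun o => o.1 - snake.1 < 0) : Nat),
       b + (obsticles.countP (fun o => o.1 - snake.1 > 0) : Nat),
       c + (obsticles.countP (fun o => o.2 - snake.2 < 0) : Nat),
       d + (obsticles.countP (fun o => o.2 - snake.2 > 0) : Nat)) := by
  induction obsticles generalizing a b c d with
  | nil => simp
  | cons o os ih =>
    simp only [List.foldl_cons]
    split_ifs with h1 h2 h3 h4 <;>
      rw [ih] <;>
      simp only [List.countP_cons, decide_eq_true_eq, Prod.mk.injEq] <;>
      refine ⟨?_, ?_, ?_, ?_⟩ <;>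
      · split_ifs <;> push_cast <;> omega

-- ===== VERDICT (by name: the statement is the Claim_ definition above) =====
theorem calcObsticles_py_spec : Claim_equal_calcObsticles_py := by
  intro obsticles snake _
  show _ = _
  simp only [calcObsticles_py, calcObsticles_py_alt]
  rw [calcObsticles_fold_inv]
  simp
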